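-- pv_equiv track=rewrite | github.com/VitorNoVictor/aeiouado_g2p | src/regras/marcador_sil_tonica.py | posRelacaoTonica
-- ===== SOURCE A (Python) =====
-- def definePosDaTonica(word):
--     silabas = word.split('-')
--     for idx, silaba in enumerate(silabas):
--         if '@' in silaba:
--             return idx
--
-- def posRelacaoTonica(trans,pos):
--     trans = trans
--     #numSyll = len(trans.split('-')) - 1
--     accentedSyll = definePosDaTonica(trans)
--
--     #cria um contador q cria uma escala com base na silaba tonica:
--     #ex.: o - @xi - to - na
--     #    -1     0    1    2
--     syllableCount = -accentedSyll
--
--     i = 0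
--     for ch in trans:
--         #Se ha um hifen, ha outra silabaa -> atualiza o contador
--         if (ch == '-'):
--             syllableCount += 1
--
--         if (i == pos):
--             return syllableCount
--         i += 1
-- ===== SOURCE B (Python) =====
-- def posRelacaoTonica(trans, pos):
--     sylls = trans.split('-')
--     base = -next(j for j, s in enumerate(sylls) if '@' in s)
--     start = 0
--     for j, s in enumerate(sylls):
--         end = start + len(s)
--         if start <= pos < end:
--             return j + base
--         if j + 1 < len(sylls) and pos == end:
--             return j + 1 + base
--         start = end + 1
--     return None
-- ===== Notes on version B (the rewrite author's own statement) =====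
-- stated objective: alternative
-- what changed: B replaces A's per-character scan (counting hyphens while walking every char of trans) with a single walk over the syllable list trans.split('-'), locating pos arithmetically by each syllable's start/end offset.
-- outside the precondition, e.g. on posRelacaoTonica('ka-za', 1): A raises TypeError, B raises StopIteration
import Mathlib
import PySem

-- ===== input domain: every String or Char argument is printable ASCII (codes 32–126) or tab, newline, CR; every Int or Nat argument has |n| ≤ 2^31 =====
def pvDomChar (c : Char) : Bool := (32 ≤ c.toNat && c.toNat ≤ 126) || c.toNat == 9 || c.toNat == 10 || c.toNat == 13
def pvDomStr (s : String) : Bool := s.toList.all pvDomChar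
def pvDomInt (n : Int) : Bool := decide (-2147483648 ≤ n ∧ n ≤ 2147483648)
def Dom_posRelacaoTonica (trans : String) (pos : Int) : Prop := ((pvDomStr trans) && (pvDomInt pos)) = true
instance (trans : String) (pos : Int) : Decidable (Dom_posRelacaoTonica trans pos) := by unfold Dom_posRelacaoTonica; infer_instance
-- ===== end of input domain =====

-- B replaces A's per-character scan with a single walk over the syllables of trans.split('-'),
-- locating pos by syllable start/end offsets (objective: alternative decomposition, same cost).

-- ===== PORT A =====
-- helper definePosDaTonica: enumerate the '-'-split pieces, first index containing '@'
def pvDefineLoop : List (List Char) → Int → Option Int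
  | [], _ => none
  | s :: rest, idx => if PySem.Chars.isIn ['@'] s then some idx else pvDefineLoop rest (idx + 1)

def definePosDaTonica (word : String) : Option Int :=
  pvDefineLoop (PySem.Chars.splitOn word.toList ['-']) 0

-- A's for-loop over the characters of trans with counter i and syllableCount
def pvALoop (pos : Int) : List Char → Int → Int → Option Int
  | [], _, _ => none
  | c :: rest, cnt, i =>
    let cnt' := if c = '-' then cnt + 1 else cnt
    if i = pos then some cnt' else pvALoop pos rest cnt' (i + 1)

def posRelacaoTonica (trans : String) (pos : Int) : Option Int :=
  match definePosDaTonica trans with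
  | none => none   -- Python raises TypeError here (no '@'); excluded by Pre_
  | some a => pvALoop pos trans.toList (-a) 0

-- ===== PORT B =====
-- B's next(j for j, s in enumerate(sylls) if '@' in s)
def pvFirstStress : List (List Char) → Int → Option Int
  | [], _ => none   -- Python raises StopIteration here; excluded by Pre_
  | s :: rest, j => if PySem.Chars.isIn ['@'] s then some j else pvFirstStress rest (j + 1)

-- B's for-loop over the syllable list with start offsets; n = len(sylls)
def pvBLoop (pos base n : Int) : List (List Char) → Int → Int → Option Int
  | [], _, _ => none
  | s :: rest, j, start =>
    let e := start + (s.length : Int)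
    if start ≤ pos ∧ pos < e then some (j + base)
    else if j + 1 < n ∧ pos = e then some (j + 1 + base)
    else pvBLoop pos base n rest (j + 1) (e + 1)

def posRelacaoTonica_alt (trans : String) (pos : Int) : Option Int :=
  let sylls := PySem.Chars.splitOn trans.toList ['-']
  match pvFirstStress sylls 0 with
  | none => none   -- Python raises StopIteration here; excluded by Pre_
  | some a => pvBLoop pos (-a) (sylls.length : Int) sylls 0 0

-- ===== PRECONDITION & SPEC =====
-- Pre_ excludes exactly the inputs where trans has no '@': there A raises TypeError
-- (definePosDaTonica returns None and -None fails); B raises StopIteration there.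
def Pre_posRelacaoTonica (trans : String) (pos : Int) : Prop := '@' ∈ trans.toList
instance (trans : String) (pos : Int) : Decidable (Pre_posRelacaoTonica trans pos) := by
  unfold Pre_posRelacaoTonica; infer_instance

def pvWitness_posRelacaoTonica : String × Int := ("to-n@-ta", 3)

def Spec_posRelacaoTonica (trans : String) (pos : Int) (out : Option Int) : Prop := out = posRelacaoTonica_alt trans pos
instance (trans : String) (pos : Int) (out : Option Int) : Decidable (Spec_posRelacaoTonica trans pos out) := by unfold Spec_posRelacaoTonica; infer_instance

-- ===== CLAIM (what is proved, stated in full; the proofs are below) =====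
def Claim_equal_posRelacaoTonica : Prop := ∀ (trans : String) (pos : Int), Dom_posRelacaoTonica trans pos → Pre_posRelacaoTonica trans pos → Spec_posRelacaoTonica trans pos (posRelacaoTonica trans pos)

-- ===== LEMMAS AND PROOFS =====

-- proof-side model of splitting a char list on '-'
def pvSp : List Char → List Char → List (List Char)
  | [], cur => [cur.reverse]
  | c :: rest, cur => if c = '-' then cur.reverse :: pvSp rest [] else pvSp rest (c :: cur)

theorem pvGo_eq_sp : ∀ (fuel : Nat) (l cur : List Char) (acc : List (List Char)),
    l.length ≤ fuel →
    PySem.Chars.splitOn.go ['-'] fuel l cur acc = acc.reverse ++ pvSp l cur := by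
  intro fuel
  induction fuel with
  | zero =>
    intro l cur acc h
    have : l = [] := by cases l <;> simp_all
    subst this
    simp [PySem.Chars.splitOn.go, pvSp]
  | succ fuel ih =>
    intro l cur acc h
    cases l with
    | nil => simp [PySem.Chars.splitOn.go, pvSp]
    | cons c rest =>
      by_cases hc : c = '-'
      · subst hc
        have hp : List.isPrefixOf ['-'] ('-' :: rest) = true := by
          simp [List.isPrefixOf]
        simp only [PySem.Chars.splitOn.go, hp]
        simp only [List.length_cons] at h
        rw [show List.drop ['-'].length ('-' :: rest) = rest from rfl]
        rw [ih rest [] (cur.reverse :: acc) (by omega)]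
        simp [pvSp]
      · have hp : List.isPrefixOf ['-'] (c :: rest) = false := by
          simp [List.isPrefixOf]
          intro hh; exact absurd hh.symm hc
        simp only [PySem.Chars.splitOn.go, hp]
        simp only [List.length_cons] at h
        rw [ih rest (c :: cur) acc (by omega)]
        simp [pvSp, hc]

theorem pvSplitOn_eq_sp (l : List Char) : PySem.Chars.splitOn l ['-'] = pvSp l [] := by
  have := pvGo_eq_sp (l.length + 1) l [] [] (by omega)
  simpa [PySem.Chars.splitOn] using this

theorem pvSp_ne_nil (l cur : List Char) : pvSp l cur ≠ [] := by
  induction l generalizing cur with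
  | nil => simp [pvSp]
  | cons c rest ih =>
    by_cases hc : c = '-' <;> simp [pvSp, hc, ih]

theorem pvSp_mem_at : ∀ (l cur : List Char), ('@' ∈ cur ∨ '@' ∈ l) →
    ∃ p ∈ pvSp l cur, '@' ∈ p := by
  intro l
  induction l with
  | nil =>
    intro cur h
    refine ⟨cur.reverse, by simp [pvSp], ?_⟩
    simpa using h.resolve_right (by simp)
  | cons c rest ih =>
    intro cur h
    by_cases hc : c = '-'
    · subst hc
      rcases h with h | h
      · exact ⟨cur.reverse, by simp [pvSp], by simpa using h⟩
      · have h' : '@' ∈ rest := by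
          rcases List.mem_cons.mp h with h | h
          · exact absurd h (by decide)
          · exact h
        obtain ⟨p, hp, hmem⟩ := ih [] (Or.inr h')
        exact ⟨p, by simp [pvSp, hp], hmem⟩
    · have h' : '@' ∈ c :: cur ∨ '@' ∈ rest := by
        rcases h with h | h
        · exact Or.inl (List.mem_cons_of_mem _ h)
        · rcases List.mem_cons.mp h with h | h
          · exact Or.inl (List.mem_cons.mpr (Or.inl h))
          · exact Or.inr h
      obtain ⟨p, hp, hmem⟩ := ih (c :: cur) h'
      exact ⟨p, by simpa [pvSp, hc] using hp, hmem⟩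

theorem pvIsIn_at {p : List Char} (h : '@' ∈ p) : PySem.Chars.isIn ['@'] p = true := by
  rw [PySem.Chars.isIn_iff_infix]
  obtain ⟨s, t, rfl⟩ := List.mem_iff_append.mp h
  exact ⟨s, t, by simp⟩

theorem pvDefineLoop_some : ∀ (ps : List (List Char)) (k : Int),
    (∃ p ∈ ps, '@' ∈ p) → ∃ a, pvDefineLoop ps k = some a := by
  intro ps
  induction ps with
  | nil => intro k h; simp at h
  | cons s rest ih =>
    intro k h
    by_cases hs : PySem.Chars.isIn ['@'] s = true
    · exact ⟨k, by simp [pvDefineLoop, hs]⟩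
    · have h' : ∃ p ∈ rest, '@' ∈ p := by
        rcases h with ⟨p, hp, hmem⟩
        rcases List.mem_cons.mp hp with rfl | hp'
        · exact absurd (pvIsIn_at hmem) hs
        · exact ⟨p, hp', hmem⟩
      obtain ⟨a, ha⟩ := ih (k + 1) h'
      exact ⟨a, by simp [pvDefineLoop, hs, ha]⟩

theorem pvFirstStress_eq : ∀ (ps : List (List Char)) (k : Int),
    pvFirstStress ps k = pvDefineLoop ps k := by
  intro ps
  induction ps with
  | nil => intro k; rfl
  | cons s rest ih =>
    intro k
    by_cases hs : PySem.Chars.isIn ['@'] s = true <;>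
      simp [pvFirstStress, pvDefineLoop, hs, ih]

-- B returns the current syllable when pos falls inside its already-consumed prefix cur
theorem pvBLoop_hit : ∀ (l cur : List Char) (pos base n j st : Int),
    st ≤ pos → pos < st + (cur.length : Int) →
    pvBLoop pos base n (pvSp l cur) j st = some (j + base) := by
  intro l
  induction l with
  | nil =>
    intro cur pos base n j st h1 h2
    have hcond : st ≤ pos ∧ pos < st + ((cur.reverse.length : Nat) : Int) := ⟨h1, by simpa using h2⟩
    simp only [pvSp]
    rw [pvBLoop, if_pos hcond]
  | cons c rest ih =>
    intro cur pos base n j st h1 h2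
    by_cases hc : c = '-'
    · subst hc
      have hcond : st ≤ pos ∧ pos < st + ((cur.reverse.length : Nat) : Int) := ⟨h1, by simpa using h2⟩
      simp only [pvSp, reduceIte]
      rw [pvBLoop, if_pos hcond]
    · simp only [pvSp, hc, if_false]
      exact ih (c :: cur) pos base n j st h1 (by simp; omega)

-- main invariant: A's char walk agrees with B's syllable walk
theorem pvMain : ∀ (l cur : List Char) (pos cnt i st j base n : Int),
    i = st + (cur.length : Int) →
    (pos < st ∨ i ≤ pos) →
    cnt = base + j →
    n = j + ((pvSp l cur).length : Int) →
    pvALoop pos l cnt i = pvBLoop pos base n (pvSp l cur) j st := by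
  intro l
  induction l with
  | nil =>
    intro cur pos cnt i st j base n hi hside hcnt hn
    simp only [pvSp] at hn ⊢
    simp only [List.length_cons, List.length_nil] at hn
    rw [pvALoop, pvBLoop]
    rw [if_neg (show ¬ (st ≤ pos ∧ pos < st + ((cur.reverse.length : Nat) : Int)) by simp; intro h1; omega)]
    rw [if_neg (show ¬ (j + 1 < n ∧ pos = st + ((cur.reverse.length : Nat) : Int)) by
      simp; intro h1; omega)]
    rw [pvBLoop]
  | cons c rest ih =>
    intro cur pos cnt i st j base n hi hside hcnt hn
    have hstle : st ≤ i := by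
      have : (0 : Int) ≤ (cur.length : Int) := by positivity
      omega
    by_cases hc : c = '-'
    · subst hc
      have hne : pvSp rest [] ≠ [] := pvSp_ne_nil rest []
      have hlen : (1 : Int) ≤ ((pvSp rest []).length : Int) := by
        cases h : pvSp rest [] with
        | nil => exact absurd h hne
        | cons a b => simp
      simp only [pvSp, reduceIte] at hn ⊢
      simp only [List.length_cons] at hn
      have hnsp : n = (j + 1) + ((pvSp rest []).length : Int) := by push_cast at hn ⊢; omega
      rw [pvALoop, pvBLoop]
      simp only [reduceIte]
      rw [if_neg (show ¬ (st ≤ pos ∧ pos < st + ((cur.reverse.length : Nat) : Int)) by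
        simp; intro h1; omega)]
      by_cases hpos : i = pos
      · rw [if_pos hpos, if_pos (show j + 1 < n ∧ pos = st + ((cur.reverse.length : Nat) : Int) by
          constructor; · omega
          · simp; omega)]
        congr 1; omega
      · rw [if_neg hpos, if_neg (show ¬ (j + 1 < n ∧ pos = st + ((cur.reverse.length : Nat) : Int)) by
          rintro ⟨-, h2⟩; simp at h2; omega)]
        have := ih [] pos (cnt + 1) (i + 1) (st + (cur.length : Int) + 1) (j + 1) base n
          (by simp [hi]) (by omega) (by omega) (by omega)
        have harg : st + ((cur.reverse.length : Nat) : Int) + 1 = st + (cur.length : Int) + 1 := by simp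
        rw [harg]
        exact this
    · simp only [pvSp, hc, if_false] at hn ⊢
      rw [pvALoop]
      simp only [hc, if_false]
      by_cases hpos : i = pos
      · rw [if_pos hpos]
        rw [pvBLoop_hit rest (c :: cur) pos base n j st (by omega) (by simp; omega)]
        congr 1; omega
      · rw [if_neg hpos]
        exact ih (c :: cur) pos cnt (i + 1) st j base n (by simp; omega) (by omega)
          (by omega) hn

-- ===== VERDICT (by name: the statement is the Claim_ definition above) =====
theorem posRelacaoTonica_spec : Claim_equal_posRelacaoTonica := by
  intro trans pos _ hpre
  unfold Spec_posRelacaoTonica posRelacaoTonica posRelacaoTonica_alt definePosDaTonica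
  obtain ⟨a, ha⟩ := pvDefineLoop_some (pvSp trans.toList []) 0
    (pvSp_mem_at trans.toList [] (Or.inr hpre))
  simp only [pvSplitOn_eq_sp, pvFirstStress_eq, ha]
  exact pvMain trans.toList [] pos (-a) 0 0 0 (-a) _
    (by simp) (by omega) (by omega) (by simp)
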